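-- pv_equiv track=rewrite | github.com/ygretharekar/srm | SRM 639/ElectronicPetEasy.py | isDifficult
-- ===== SOURCE A (Python) =====
-- def isDifficult(st1, p1, t1, st2, p2, t2):
--     pet1 = [st1 + i*p1 for i in range(t1)]
--     pet2 = [st2 + i*p2 for i in range(t2)]
--
--     ans = "Easy"
--
--     for i in pet1:
--         for j in pet2:
--             if i == j:
--                 ans = "Difficult"
--
--     return ans
-- ===== SOURCE B (Python) =====
-- def isDifficult(st1, p1, t1, st2, p2, t2):
--     # O(t1): never materialise the second sequence; an arithmetic divisibility
--     # test decides membership of each term of sequence 1 in sequence 2.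
--     for i in range(t1):
--         x = st1 + i * p1
--         if p2 == 0:
--             if t2 > 0 and x == st2:
--                 return "Difficult"
--         else:
--             q, r = divmod(x - st2, p2)
--             if r == 0 and 0 <= q < t2:
--                 return "Difficult"
--     return "Easy"
-- ===== Notes on version B (the rewrite author's own statement) =====
-- stated objective: faster
-- what changed: Drops the second sequence entirely: for each term of sequence 1 a divmod-based arithmetic test (divisibility of x-st2 by p2 plus a quotient range check, with a special case for p2==0) decides membership in sequence 2, with early exit.
import Mathlib
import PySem

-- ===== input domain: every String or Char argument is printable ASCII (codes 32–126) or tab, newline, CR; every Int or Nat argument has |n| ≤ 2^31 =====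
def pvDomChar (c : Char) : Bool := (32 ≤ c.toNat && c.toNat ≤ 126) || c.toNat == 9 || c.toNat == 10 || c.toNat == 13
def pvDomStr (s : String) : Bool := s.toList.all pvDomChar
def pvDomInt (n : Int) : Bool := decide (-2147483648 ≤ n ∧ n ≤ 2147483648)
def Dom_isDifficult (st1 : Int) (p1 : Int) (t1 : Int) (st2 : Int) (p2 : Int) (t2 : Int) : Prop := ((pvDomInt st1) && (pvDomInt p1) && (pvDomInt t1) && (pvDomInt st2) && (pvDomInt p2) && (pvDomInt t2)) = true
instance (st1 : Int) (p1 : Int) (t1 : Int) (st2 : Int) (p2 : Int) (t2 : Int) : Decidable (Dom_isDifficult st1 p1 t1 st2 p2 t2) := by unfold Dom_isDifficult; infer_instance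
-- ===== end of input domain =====

-- B never builds the second sequence: a divmod-based arithmetic test per term of
-- sequence 1 decides membership in sequence 2 (objective: faster, O(t1) vs O(t1*t2)).

-- ===== PORT A =====
def isDifficult (st1 : Int) (p1 : Int) (t1 : Int) (st2 : Int) (p2 : Int) (t2 : Int) : String :=
  let pet1 := (PySem.List.pyRange 0 t1 1).map (fun i => st1 + i * p1)
  let pet2 := (PySem.List.pyRange 0 t2 1).map (fun i => st2 + i * p2)
  pet1.foldl (fun ans i =>
    pet2.foldl (fun ans j => if i = j then "Difficult" else ans) ans) "Easy"

-- ===== PORT B =====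
-- early-return-in-loop ported as List.any over the range
def isDifficult_alt (st1 : Int) (p1 : Int) (t1 : Int) (st2 : Int) (p2 : Int) (t2 : Int) : String :=
  if (PySem.List.pyRange 0 t1 1).any (fun i =>
      let x := st1 + i * p1
      if p2 = 0 then
        decide (t2 > 0) && decide (x = st2)
      else
        let q := PySem.Int.floordiv (x - st2) p2
        let r := PySem.Int.mod (x - st2) p2
        decide (r = 0) && decide (0 ≤ q) && decide (q < t2)) then
    "Difficult"
  else
    "Easy"

-- ===== PRECONDITION & SPEC =====
def Spec_isDifficult (st1 : Int) (p1 : Int) (t1 : Int) (st2 : Int) (p2 : Int) (t2 : Int) (out : String) : Prop := out = isDifficult_alt st1 p1 t1 st2 p2 t2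
instance (st1 : Int) (p1 : Int) (t1 : Int) (st2 : Int) (p2 : Int) (t2 : Int) (out : String) : Decidable (Spec_isDifficult st1 p1 t1 st2 p2 t2 out) := by unfold Spec_isDifficult; infer_instance

-- ===== CLAIM =====
def Claim_equal_isDifficult : Prop := ∀ (st1 : Int) (p1 : Int) (t1 : Int) (st2 : Int) (p2 : Int) (t2 : Int), Dom_isDifficult st1 p1 t1 st2 p2 t2 → Spec_isDifficult st1 p1 t1 st2 p2 t2 (isDifficult st1 p1 t1 st2 p2 t2)

-- ===== LEMMAS AND PROOFS =====

-- A's inner loop: sets ans to "Difficult" iff the current i occurs in pet2.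
theorem pvInner (i : Int) (pet2 : List Int) (acc : String) :
    pet2.foldl (fun ans j => if i = j then "Difficult" else ans) acc =
      if i ∈ pet2 then "Difficult" else acc := by
  induction pet2 generalizing acc with
  | nil => simp
  | cons j rest ih =>
    simp only [List.foldl_cons, ih, List.mem_cons]
    by_cases h : i = j <;> by_cases h2 : i ∈ rest <;> simp [h, h2]

-- A's outer loop: "Difficult" iff some term of pet1 occurs in pet2.
theorem pvOuter (pet1 pet2 : List Int) (acc : String) :
    pet1.foldl (fun ans i =>
        pet2.foldl (fun ans j => if i = j then "Difficult" else ans) ans) acc =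
      if ∃ i ∈ pet1, i ∈ pet2 then "Difficult" else acc := by
  induction pet1 generalizing acc with
  | nil => simp
  | cons i rest ih =>
    rw [List.foldl_cons, pvInner, ih]
    by_cases h : i ∈ pet2 <;> by_cases h2 : ∃ x ∈ rest, x ∈ pet2 <;>
      simp [List.mem_cons, h, h2]

-- B's arithmetic test decides membership of x in the second sequence.
theorem pvMemTest (x st2 p2 t2 : Int) :
    ((if p2 = 0 then
        decide (t2 > 0) && decide (x = st2)
      else
        decide (PySem.Int.mod (x - st2) p2 = 0) &&
        decide (0 ≤ PySem.Int.floordiv (x - st2) p2) &&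
        decide (PySem.Int.floordiv (x - st2) p2 < t2)) = true) ↔
      x ∈ (PySem.List.pyRange 0 t2 1).map (fun j => st2 + j * p2) := by
  simp only [List.mem_map, PySem.List.mem_pyRange_one]
  by_cases hp : p2 = 0
  · subst hp
    rw [if_pos rfl]
    simp only [Bool.and_eq_true, decide_eq_true_eq]
    constructor
    · rintro ⟨ht, hx⟩; exact ⟨0, ⟨le_refl 0, ht⟩, by omega⟩
    · rintro ⟨j, ⟨h0, hj⟩, hx⟩
      exact ⟨by omega, by omega⟩
  · rw [if_neg hp]
    simp only [Bool.and_eq_true, decide_eq_true_eq]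
    constructor
    · rintro ⟨⟨hr, h0⟩, ht⟩
      refine ⟨PySem.Int.floordiv (x - st2) p2, ⟨h0, ht⟩, ?_⟩
      have h1 := PySem.Int.floordiv_mul_add_mod (x - st2) p2
      rw [hr] at h1
      omega
    · rintro ⟨j, ⟨h0, hj⟩, hx⟩
      have hdvd : p2 ∣ (x - st2) := ⟨j, by linear_combination -hx⟩
      have hr : PySem.Int.mod (x - st2) p2 = 0 :=
        (PySem.Int.mod_eq_zero_iff_dvd _ _).mpr hdvd
      have hq : PySem.Int.floordiv (x - st2) p2 = j := by
        have h1 := PySem.Int.floordiv_mul_add_mod (x - st2) p2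
        rw [hr] at h1
        have h2 : (PySem.Int.floordiv (x - st2) p2) * p2 = j * p2 := by
          linear_combination h1 - hx
        exact mul_right_cancel₀ hp h2
      rw [hq]
      exact ⟨⟨hr, h0⟩, hj⟩

-- ===== VERDICT =====
theorem isDifficult_spec : Claim_equal_isDifficult := by
  intro st1 p1 t1 st2 p2 t2 _
  unfold Spec_isDifficult isDifficult isDifficult_alt
  rw [pvOuter]
  have key : ((PySem.List.pyRange 0 t1 1).any (fun i =>
      let x := st1 + i * p1
      if p2 = 0 then decide (t2 > 0) && decide (x = st2)
      else
        let q := PySem.Int.floordiv (x - st2) p2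
        let r := PySem.Int.mod (x - st2) p2
        decide (r = 0) && decide (0 ≤ q) && decide (q < t2)) = true)
      ↔ ∃ i ∈ (PySem.List.pyRange 0 t1 1).map (fun i => st1 + i * p1),
          i ∈ (PySem.List.pyRange 0 t2 1).map (fun j => st2 + j * p2) := by
    simp only [List.any_eq_true]
    constructor
    · rintro ⟨i, hi, hb⟩
      exact ⟨st1 + i * p1, List.mem_map.mpr ⟨i, hi, rfl⟩, (pvMemTest _ _ _ _).mp hb⟩
    · rintro ⟨x, hx, hmem⟩
      obtain ⟨i, hi, rfl⟩ := List.mem_map.mp hx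
      exact ⟨i, hi, (pvMemTest _ _ _ _).mpr hmem⟩
  exact (if_congr key rfl rfl).symm
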